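-- pv_equiv track=rewrite | github.com/Temerizen/Zerenthis | backend/app/live_mode.py | _basic_text_intel
-- ===== SOURCE A (Python) =====
-- def _basic_text_intel(text: str):
--     t = (text or "").lower()
--     niche = "Content Monetization"
--     buyer = "Creators"
--     promise = "move faster"
--     intent = "general"
--
--     if any(x in t for x in ["fitness", "workout", "gym"]):
--         niche = "Fitness"
--     elif any(x in t for x in ["crypto", "trading", "finance", "stock"]):
--         niche = "Finance"
--     elif any(x in t for x in ["ai", "automation", "agent", "tech"]):
--         niche = "AI / Tech"
--
--     if any(x in t for x in ["founder", "business", "agency"]):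
--         buyer = "Founders"
--
--     if any(x in t for x in ["money", "sell", "offer", "income", "revenue"]):
--         promise = "make money faster"
--         intent = "monetization"
--     elif any(x in t for x in ["content", "post", "youtube", "tiktok"]):
--         promise = "create content faster"
--         intent = "content"
--
--     return {
--         "niche": niche,
--         "buyer": buyer,
--         "promise": promise,
--         "intent": intent
--     }
-- ===== SOURCE B (Python) =====
-- # Reversed-precedence overwrite table: one flat loop over all rule groups,
-- # lowest-precedence rules first, so the last matching write (= the
-- # highest-precedence matching group) is what remains in the dict.
-- _DEFAULTS = (
--     ("niche", "Content Monetization"),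
--     ("buyer", "Creators"),
--     ("promise", "move faster"),
--     ("intent", "general"),
-- )
--
-- _RULES = (
--     (("ai", "automation", "agent", "tech"), {"niche": "AI / Tech"}),
--     (("crypto", "trading", "finance", "stock"), {"niche": "Finance"}),
--     (("fitness", "workout", "gym"), {"niche": "Fitness"}),
--     (("founder", "business", "agency"), {"buyer": "Founders"}),
--     (("content", "post", "youtube", "tiktok"),
--      {"promise": "create content faster", "intent": "content"}),
--     (("money", "sell", "offer", "income", "revenue"),
--      {"promise": "make money faster", "intent": "monetization"}),
-- )
--
--
-- def _basic_text_intel(text: str):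
--     t = (text or "").lower()
--     out = dict(_DEFAULTS)
--     for keywords, updates in _RULES:
--         if any(k in t for k in keywords):
--             out.update(updates)
--     return out
-- ===== Notes on version B (the rewrite author's own statement) =====
-- stated objective: idiomatic
-- what changed: Replaces A's three separate first-match if/elif chains by one flat loop over a reversed-precedence rule table that overwrites a defaults dict, so the last matching write (highest precedence) wins instead of an early-exit first match.
import Mathlib
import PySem

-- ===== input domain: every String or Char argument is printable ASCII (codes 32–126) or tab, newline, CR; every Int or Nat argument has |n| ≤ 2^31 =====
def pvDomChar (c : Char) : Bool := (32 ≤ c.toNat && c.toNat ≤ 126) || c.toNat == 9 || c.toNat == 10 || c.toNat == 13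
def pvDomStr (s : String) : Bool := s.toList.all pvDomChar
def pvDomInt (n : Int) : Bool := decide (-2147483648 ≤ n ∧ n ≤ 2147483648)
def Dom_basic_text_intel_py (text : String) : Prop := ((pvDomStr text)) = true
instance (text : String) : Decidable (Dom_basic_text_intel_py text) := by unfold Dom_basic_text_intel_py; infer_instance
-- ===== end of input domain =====

-- B replaces A's first-match if/elif chains by one flat loop over a reversed-precedence
-- rule table overwriting a defaults dict (idiomatic, same cost).

-- ===== PORT A =====
def basic_text_intel_py (text : String) : List (String × String) :=
  let t := PySem.Str.lower (if text == "" then "" else text)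
  let niche :=
    if (["fitness", "workout", "gym"] : List String).any (fun x => PySem.Str.isIn x t) then
      "Fitness"
    else if (["crypto", "trading", "finance", "stock"] : List String).any (fun x => PySem.Str.isIn x t) then
      "Finance"
    else if (["ai", "automation", "agent", "tech"] : List String).any (fun x => PySem.Str.isIn x t) then
      "AI / Tech"
    else "Content Monetization"
  let buyer :=
    if (["founder", "business", "agency"] : List String).any (fun x => PySem.Str.isIn x t) then
      "Founders"
    else "Creators"
  -- promise and intent are both assigned in the same branch of one if/elif
  let pi :=
    if (["money", "sell", "offer", "income", "revenue"] : List String).any (fun x => PySem.Str.isIn x t) then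
      ("make money faster", "monetization")
    else if (["content", "post", "youtube", "tiktok"] : List String).any (fun x => PySem.Str.isIn x t) then
      ("create content faster", "content")
    else ("move faster", "general")
  [("niche", niche), ("buyer", buyer), ("promise", pi.1), ("intent", pi.2)]

-- ===== PORT B =====
-- _RULES: flat list of (keyword group, updates) in REVERSED precedence order
def pvRules : List (List String × List (String × String)) :=
  [(["ai", "automation", "agent", "tech"], [("niche", "AI / Tech")]),
   (["crypto", "trading", "finance", "stock"], [("niche", "Finance")]),
   (["fitness", "workout", "gym"], [("niche", "Fitness")]),
   (["founder", "business", "agency"], [("buyer", "Founders")]),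
   (["content", "post", "youtube", "tiktok"],
      [("promise", "create content faster"), ("intent", "content")]),
   (["money", "sell", "offer", "income", "revenue"],
      [("promise", "make money faster"), ("intent", "monetization")])]

def basic_text_intel_py_alt (text : String) : List (String × String) :=
  let t := PySem.Str.lower (if text == "" then "" else text)
  let out0 : PySem.Dict String String :=
    PySem.Dict.ofList [("niche", "Content Monetization"), ("buyer", "Creators"),
                       ("promise", "move faster"), ("intent", "general")]
  let out := pvRules.foldl
    (fun d r =>
      if r.1.any (fun x => PySem.Str.isIn x t) then d.update r.2 else d)
    out0
  out.items

-- ===== PRECONDITION & SPEC =====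
def Spec_basic_text_intel_py (text : String) (out : List (String × String)) : Prop := out = basic_text_intel_py_alt text
instance (text : String) (out : List (String × String)) : Decidable (Spec_basic_text_intel_py text out) := by unfold Spec_basic_text_intel_py; infer_instance

-- ===== CLAIM (what is proved, stated in full; the proofs are below) =====
def Claim_equal_basic_text_intel_py : Prop := ∀ (text : String), Dom_basic_text_intel_py text → Spec_basic_text_intel_py text (basic_text_intel_py text)

-- ===== LEMMAS AND PROOFS =====

-- Core combinatorial fact, with the six keyword-group hit tests abstracted as Booleans:
-- A's if/elif-chain record equals B's reversed-overwrite dict items.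
theorem pvKey (n1 n2 n3 b p1 p2 : Bool) :
    (let niche := if n1 then "Fitness" else if n2 then "Finance"
                  else if n3 then "AI / Tech" else "Content Monetization"
     let buyer := if b then "Founders" else "Creators"
     let pi := if p1 then ("make money faster", "monetization")
               else if p2 then ("create content faster", "content")
               else ("move faster", "general")
     ([("niche", niche), ("buyer", buyer), ("promise", pi.1), ("intent", pi.2)] :
        List (String × String)))
    =
    (let out0 : PySem.Dict String String :=
       PySem.Dict.ofList [("niche", "Content Monetization"), ("buyer", "Creators"),
                          ("promise", "move faster"), ("intent", "general")]
     let d1 := if n3 then out0.update [("niche", "AI / Tech")] else out0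
     let d2 := if n2 then d1.update [("niche", "Finance")] else d1
     let d3 := if n1 then d2.update [("niche", "Fitness")] else d2
     let d4 := if b then d3.update [("buyer", "Founders")] else d3
     let d5 := if p2 then d4.update
         [("promise", "create content faster"), ("intent", "content")] else d4
     let d6 := if p1 then d5.update
         [("promise", "make money faster"), ("intent", "monetization")] else d5
     d6.items) := by
  revert n1 n2 n3 b p1 p2
  decide

-- ===== VERDICT (by name: the statement is the Claim_ definition above) =====
theorem basic_text_intel_py_spec : Claim_equal_basic_text_intel_py := by
  intro text _
  unfold Spec_basic_text_intel_py basic_text_intel_py basic_text_intel_py_alt pvRules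
  simp only [List.foldl_cons, List.foldl_nil]
  exact pvKey _ _ _ _ _ _
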